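-- pv_equiv track=rewrite | github.com/xtt5241/xtt-workflow | manager/task_boundary.py | path_matches_prefix
-- ===== SOURCE A (Python) =====
-- def path_matches_prefix(path: str, prefixes: list[str]) -> bool:
--     normalized = path.strip('/')
--     for prefix in prefixes:
--         cleaned = prefix.strip('/')
--         if not cleaned:
--             continue
--         if normalized == cleaned or normalized.startswith(cleaned + '/'):
--             return True
--     return False
-- ===== SOURCE B (Python) =====
-- def path_matches_prefix(path: str, prefixes: list[str]) -> bool:
--     parts = path.strip('/').split('/')
--     ancestors = {'/'.join(parts[:k]) for k in range(1, len(parts) + 1)}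
--     ancestors.discard('')
--     return any(prefix.strip('/') in ancestors for prefix in prefixes)
-- ===== Notes on version B (the rewrite author's own statement) =====
-- stated objective: alternative
-- what changed: B inverts the search: it precomputes the set of all '/'-boundary ancestors of the path once (discarding the empty one) and then tests each stripped prefix for membership in that set, instead of A's per-prefix equality/startswith(cleaned + '/') string tests against the path.
import Mathlib
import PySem

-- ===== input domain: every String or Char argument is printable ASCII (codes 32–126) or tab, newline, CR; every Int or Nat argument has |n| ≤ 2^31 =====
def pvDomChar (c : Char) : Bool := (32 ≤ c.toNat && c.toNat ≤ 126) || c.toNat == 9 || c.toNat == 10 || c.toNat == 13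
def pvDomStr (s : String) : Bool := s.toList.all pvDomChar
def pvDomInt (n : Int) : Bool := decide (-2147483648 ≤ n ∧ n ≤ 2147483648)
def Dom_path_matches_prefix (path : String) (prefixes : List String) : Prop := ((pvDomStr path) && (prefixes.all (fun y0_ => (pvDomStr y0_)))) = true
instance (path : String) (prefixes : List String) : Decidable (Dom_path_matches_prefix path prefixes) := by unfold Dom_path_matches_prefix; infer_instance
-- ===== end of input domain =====

-- B inverts the search: it builds the set of '/'-boundary ancestors of the path once (minus the
-- empty one) and tests each stripped prefix for membership, instead of A's per-prefix
-- equality/startswith string tests against the path. Alternative algorithm, same result.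

-- ===== PORT A =====
-- the for-loop with continue / early return
def pmpGoA (normalized : List Char) : List String → Bool
  | [] => false
  | p :: rest =>
    let cleaned := PySem.Chars.stripChars p.toList ['/']
    if cleaned = [] then pmpGoA normalized rest
    else if normalized == cleaned || PySem.Chars.startswith normalized (cleaned ++ ['/']) then
      true
    else pmpGoA normalized rest

def path_matches_prefix (path : String) (prefixes : List String) : Bool :=
  let normalized := PySem.Chars.stripChars path.toList ['/']
  pmpGoA normalized prefixes

-- ===== PORT B =====
-- str.split('/') is ported as List.splitOn '/' (exact for a one-char separator: empty parts kept);
-- the set comprehension over range(1, len+1) is Set.ofList of the mapped range; discard('') is Set.discard.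
def path_matches_prefix_alt (path : String) (prefixes : List String) : Bool :=
  let parts := (PySem.Chars.stripChars path.toList ['/']).splitOn '/'
  let ancestors : PySem.Set (List Char) :=
    PySem.Set.ofList ((List.range parts.length).map
      (fun k => PySem.Chars.join ['/'] (parts.take (k + 1))))
  let ancestors := PySem.Set.discard ancestors []
  prefixes.any fun p => PySem.Set.contains ancestors (PySem.Chars.stripChars p.toList ['/'])

-- ===== PRECONDITION & SPEC =====
def Spec_path_matches_prefix (path : String) (prefixes : List String) (out : Bool) : Prop := out = path_matches_prefix_alt path prefixes
instance (path : String) (prefixes : List String) (out : Bool) : Decidable (Spec_path_matches_prefix path prefixes out) := by unfold Spec_path_matches_prefix; infer_instance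

-- ===== CLAIM (what is proved, stated in full; the proofs are below) =====
def Claim_equal_path_matches_prefix : Prop := ∀ (path : String) (prefixes : List String), Dom_path_matches_prefix path prefixes → Spec_path_matches_prefix path prefixes (path_matches_prefix path prefixes)

-- ===== LEMMAS AND PROOFS =====

-- intercalate over a cons with a nonempty tail
theorem pv_intercalate_cons {α : Type} (x : α) (a : List α) (l : List (List α)) (hl : l ≠ []) :
    [x].intercalate (a :: l) = a ++ x :: [x].intercalate l := by
  cases l with
  | nil => exact absurd rfl hl
  | cons b l' => simp [List.intercalate, List.intersperse]

-- intercalate over an append of two nonempty lists of pieces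
theorem pv_intercalate_append {α : Type} (x : α) (as bs : List (List α))
    (ha : as ≠ []) (hb : bs ≠ []) :
    [x].intercalate (as ++ bs) = [x].intercalate as ++ x :: [x].intercalate bs := by
  induction as with
  | nil => exact absurd rfl ha
  | cons a as' ih =>
    cases as' with
    | nil =>
      rw [List.singleton_append, pv_intercalate_cons x a bs hb]
      simp [List.intercalate]
    | cons a' as'' =>
      rw [List.cons_append, pv_intercalate_cons x a (a' :: as'' ++ bs) (by simp),
        pv_intercalate_cons x a (a' :: as'') (by simp), ih (by simp)]
      simp

-- the key characterisation: c is a '/'-boundary ancestor of n ⟺ n = c or n starts with c ++ '/'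
theorem pv_ancestor_iff (n c : List Char) :
    (∃ k, k < (n.splitOn '/').length ∧
        [('/' : Char)].intercalate ((n.splitOn '/').take (k + 1)) = c)
    ↔ (n = c ∨ (c ++ ['/']) <+: n) := by
  have hjn := List.intercalate_splitOn (xs := n) '/'
  have hlen : (n.splitOn '/') ≠ [] := List.splitOnP_ne_nil _ n
  constructor
  · rintro ⟨k, hk, rfl⟩
    by_cases hlast : k + 1 = (n.splitOn '/').length
    · left
      rw [List.take_of_length_le (le_of_eq hlast.symm), hjn]
    · right
      have hsplit : n.splitOn '/' = (n.splitOn '/').take (k + 1) ++ (n.splitOn '/').drop (k + 1) :=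
        (List.take_append_drop _ _).symm
      have hd : (n.splitOn '/').drop (k + 1) ≠ [] := by
        intro h
        have := List.length_drop (l := n.splitOn '/') (i := k + 1)
        rw [h] at this
        simp only [List.length_nil] at this
        omega
      have ht : (n.splitOn '/').take (k + 1) ≠ [] := by
        intro h
        rcases List.take_eq_nil_iff.mp h with h' | h'
        · omega
        · exact hlen h'
      have := pv_intercalate_append ('/' : Char) _ _ ht hd
      rw [← hsplit] at this
      refine ⟨[('/' : Char)].intercalate ((n.splitOn '/').drop (k + 1)), ?_⟩
      rw [show [('/' : Char)].intercalate ((n.splitOn '/').take (k + 1)) ++ ['/'] ++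
            [('/' : Char)].intercalate ((n.splitOn '/').drop (k + 1))
          = [('/' : Char)].intercalate ((n.splitOn '/').take (k + 1)) ++
            '/' :: [('/' : Char)].intercalate ((n.splitOn '/').drop (k + 1)) by simp,
        ← this, hjn]
  · rintro (rfl | ⟨r, hr⟩)
    · have hpos : 0 < (n.splitOn '/').length := List.length_pos_iff.mpr hlen
      refine ⟨(n.splitOn '/').length - 1, by omega, ?_⟩
      have h1 : (n.splitOn '/').length - 1 + 1 = (n.splitOn '/').length := by omega
      rw [h1, List.take_of_length_le (le_refl _), hjn]
    · have h3 : c ++ ['/'] ++ r = c ++ '/' :: r := by simp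
      have hsp : n.splitOn '/' = c.splitOn '/' ++ r.splitOn '/' := by
        rw [← hr, h3]
        simp only [List.splitOn]
        rw [List.splitOnP_append_cons _ c r '/' (by simp)]
      have hcne : c.splitOn '/' ≠ [] := List.splitOnP_ne_nil _ c
      have hrne : r.splitOn '/' ≠ [] := List.splitOnP_ne_nil _ r
      refine ⟨(c.splitOn '/').length - 1, ?_, ?_⟩
      · rw [hsp, List.length_append]
        have h4 : 0 < (c.splitOn '/').length := List.length_pos_iff.mpr hcne
        have h5 : 0 < (r.splitOn '/').length := List.length_pos_iff.mpr hrne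
        omega
      · have h4 : 0 < (c.splitOn '/').length := List.length_pos_iff.mpr hcne
        have h6 : (c.splitOn '/').length - 1 + 1 = (c.splitOn '/').length := by omega
        rw [h6, hsp, List.take_append_of_le_length (le_refl _), List.take_of_length_le (le_refl _)]
        exact List.intercalate_splitOn (xs := c) '/'

-- per-prefix step: A's string test equals membership of c in B's discarded ancestor set
theorem pv_step_eq (n c : List Char) :
    (if c = [] then false
     else (n == c || PySem.Chars.startswith n (c ++ ['/'])))
    = PySem.Set.contains
        (PySem.Set.discard
          (PySem.Set.ofList ((List.range (n.splitOn '/').length).map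
            (fun k => PySem.Chars.join ['/'] ((n.splitOn '/').take (k + 1))))) []) c := by
  have hmem : c ∈ PySem.Set.discard
      (PySem.Set.ofList ((List.range (n.splitOn '/').length).map
        (fun k => PySem.Chars.join ['/'] ((n.splitOn '/').take (k + 1))))) []
      ↔ (c ≠ [] ∧ (n = c ∨ (c ++ ['/']) <+: n)) := by
    rw [PySem.Set.mem_discard, PySem.Set.mem_ofList, List.mem_map]
    constructor
    · rintro ⟨⟨k, hk, hc⟩, hne⟩
      rw [List.mem_range] at hk
      exact ⟨hne, (pv_ancestor_iff n c).mp ⟨k, hk, hc⟩⟩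
    · rintro ⟨hne, h⟩
      obtain ⟨k, hk, hc⟩ := (pv_ancestor_iff n c).mpr h
      exact ⟨⟨k, List.mem_range.mpr hk, hc⟩, hne⟩
  by_cases hc : c = []
  · rw [if_pos hc]
    symm
    rw [Bool.eq_false_iff]
    intro habs
    exact (hmem.mp ((PySem.Set.contains_iff _ _).mp habs)).1 hc
  · rw [if_neg hc]
    by_cases h : n = c ∨ (c ++ ['/']) <+: n
    · have : PySem.Set.contains _ c = true := (PySem.Set.contains_iff _ _).mpr (hmem.mpr ⟨hc, h⟩)
      rw [this]
      rcases h with rfl | hsw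
      · simp
      · rw [(PySem.Chars.startswith_iff n (c ++ ['/'])).2 hsw, Bool.or_true]
    · have hcon : PySem.Set.contains
          (PySem.Set.discard
            (PySem.Set.ofList ((List.range (n.splitOn '/').length).map
              (fun k => PySem.Chars.join ['/'] ((n.splitOn '/').take (k + 1))))) []) c = false := by
        rw [Bool.eq_false_iff]
        intro habs
        exact h (hmem.mp ((PySem.Set.contains_iff _ _).mp habs)).2
      rw [hcon]
      obtain ⟨h1, h2⟩ := not_or.mp h
      simp only [Bool.or_eq_false_iff]
      refine ⟨beq_eq_false_iff_ne.2 h1, ?_⟩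
      cases hb2 : PySem.Chars.startswith n (c ++ ['/']) with
      | false => rfl
      | true => exact absurd ((PySem.Chars.startswith_iff n _).1 hb2) h2

-- A's loop equals B's any-over-prefixes of the membership test
theorem pv_go_eq (n : List Char) (prefixes : List String) :
    pmpGoA n prefixes
    = prefixes.any (fun p => PySem.Set.contains
        (PySem.Set.discard
          (PySem.Set.ofList ((List.range (n.splitOn '/').length).map
            (fun k => PySem.Chars.join ['/'] ((n.splitOn '/').take (k + 1))))) [])
        (PySem.Chars.stripChars p.toList ['/'])) := by
  induction prefixes with
  | nil => simp [pmpGoA]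
  | cons p rest ih =>
    rw [List.any_cons, ← ih]
    have hstep := pv_step_eq n (PySem.Chars.stripChars p.toList ['/'])
    by_cases hc : PySem.Chars.stripChars p.toList ['/'] = []
    · simp only [pmpGoA, if_pos hc]
      rw [if_pos hc] at hstep
      rw [← hstep]
      simp
    · simp only [pmpGoA, if_neg hc]
      rw [if_neg hc] at hstep
      rw [← hstep]
      by_cases hm : (n == PySem.Chars.stripChars p.toList ['/']
          || PySem.Chars.startswith n (PySem.Chars.stripChars p.toList ['/'] ++ ['/'])) = true
      · simp [hm]
      · simp [Bool.not_eq_true] at hm; simp [hm]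

-- ===== VERDICT (by name: the statement is the Claim_ definition above) =====
theorem path_matches_prefix_spec : Claim_equal_path_matches_prefix := by
  intro path prefixes _
  unfold Spec_path_matches_prefix path_matches_prefix path_matches_prefix_alt
  exact pv_go_eq _ _
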